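-- pv_equiv track=rewrite | github.com/ycchae/CodingTest | src/프로그래머스-고득점/힙/더_맵게.py | solution
-- ===== SOURCE A (Python) =====
-- def solution(scoville, K):
--     answer = 0
--     import heapq
--     heapq.heapify(scoville)
--     while scoville[0] < K:
--         try:
--             small = heapq.heappop(scoville)
--             second_small = heapq.heappop(scoville)
--         except:
--             return -1
--         new_s = small + second_small*2
--         heapq.heappush(scoville, new_s)
--         answer += 1
--     return answer
-- ===== SOURCE B (Python) =====
-- def solution(scoville, K):
--     lst = list(scoville)
--     count = 0
--     while min(lst) < K:
--         if len(lst) < 2: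
--             return -1
--         a = lst.pop(lst.index(min(lst)))
--         b = lst.pop(lst.index(min(lst)))
--         lst.append(a + 2 * b)
--         count += 1
--     return count
-- ===== Notes on version B (the rewrite author's own statement) =====
-- stated objective: alternative
-- what changed: Replaces the binary heap (heapify/heappop/heappush) by a plain list on which each round scans for and removes the two smallest values with min/index/pop, appending the combined value; B also works on a copy so the caller's list is not mutated (A heapifies it in place).
import Mathlib
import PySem

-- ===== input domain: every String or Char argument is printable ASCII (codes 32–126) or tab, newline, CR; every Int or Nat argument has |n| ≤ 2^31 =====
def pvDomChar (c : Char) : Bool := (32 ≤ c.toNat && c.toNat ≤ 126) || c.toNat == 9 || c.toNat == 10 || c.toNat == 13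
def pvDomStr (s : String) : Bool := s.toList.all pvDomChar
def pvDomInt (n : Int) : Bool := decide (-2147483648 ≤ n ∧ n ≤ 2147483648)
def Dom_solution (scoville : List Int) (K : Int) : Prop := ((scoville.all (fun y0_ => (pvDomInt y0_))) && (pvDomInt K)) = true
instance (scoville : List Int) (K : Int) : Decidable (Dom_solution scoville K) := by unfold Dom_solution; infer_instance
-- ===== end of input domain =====

-- B replaces A's binary heap by per-round linear scans for the two minima (alternative
-- decomposition, not faster). Equivalence is about the RETURN value only: A heapifies the
-- caller's list in place, B works on a copy.

-- ===== PORT A =====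
-- A's heapq.heapify/heappop/heappush are library calls on a list of Int.  Over Int every
-- value heapq ever returns (heap[0], each heappop) is determined solely by the multiset of
-- elements in the heap, so the heap is modeled exactly (for returned values) by a
-- min-sorted list: heapify = sort, heappop = take the head, heappush = ordered insert.
-- The in-place array layout of the real heap is not observable in the return value.
def heapPush (x : Int) : List Int → List Int
  | [] => [x]
  | y :: ys => if x ≤ y then x :: y :: ys else y :: heapPush x ys

def heapify (xs : List Int) : List Int := xs.foldr heapPush []

theorem length_heapPush (x : Int) (l : List Int) :
    (heapPush x l).length = l.length + 1 := by
  induction l with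
  | nil => rfl
  | cons y ys ih => simp only [heapPush]; split <;> simp [ih]

-- while scoville[0] < K: pop the two smallest (except → -1), push small + second_small*2
def solutionLoop (h : List Int) (K : Int) (answer : Int) : Int :=
  match h with
  | [] => 0  -- scoville[0] raises IndexError here (excluded by Pre_solution)
  | small :: rest =>
    if small < K then
      match rest with
      | [] => -1  -- second heappop raises, caught: return -1
      | second :: rest2 =>
        solutionLoop (heapPush (small + second * 2) rest2) K (answer + 1)
    else answer
termination_by h.length
decreasing_by simp [length_heapPush]

def solution (scoville : List Int) (K : Int) : Int :=
  solutionLoop (heapify scoville) K 0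

-- ===== PORT B =====
-- min(lst) on a nonempty list is the running-min loop (PySem.List.min?_id_cons)
def minI (xs : List Int) : Int :=
  match xs with
  | [] => 0  -- min([]) raises ValueError (never reached: the loop guards lst ≠ [])
  | x :: t => t.foldl min x

theorem minI_min? (x : Int) (t : List Int) :
    PySem.List.min? (x :: t) (fun y => y) = some (minI (x :: t)) := by
  simpa [minI] using PySem.List.min?_id_cons x t

theorem minI_mem (xs : List Int) (h : xs ≠ []) : minI xs ∈ xs := by
  match xs with
  | x :: t => exact PySem.List.min?_mem (minI_min? x t)

-- while min(lst) < K: if len < 2 return -1; pop the first occurrence of the min twice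
-- (lst.pop(lst.index(min(lst))) = erase the first occurrence of the minimum), append a+2b.
def solutionAltLoop (lst : List Int) (K : Int) (count : Int) : Int :=
  if hne : lst = [] then 0  -- min([]) raises ValueError here (excluded by Pre_solution)
  else
    let a := minI lst
    if a < K then
      if lst.length < 2 then -1
      else
        let l1 := lst.erase a
        let b := minI l1
        solutionAltLoop (l1.erase b ++ [a + 2 * b]) K (count + 1)
    else count
termination_by lst.length
decreasing_by
  have hml : minI lst ∈ lst := minI_mem lst hne
  have h1 : (lst.erase (minI lst)).length = lst.length - 1 := List.length_erase_of_mem hml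
  have hne1 : lst.erase (minI lst) ≠ [] := by
    intro h; rw [h] at h1; simp at h1; omega
  have hbl : minI (lst.erase (minI lst)) ∈ lst.erase (minI lst) := minI_mem _ hne1
  have h2 : ((lst.erase (minI lst)).erase (minI (lst.erase (minI lst)))).length
      = (lst.erase (minI lst)).length - 1 := List.length_erase_of_mem hbl
  simp only [List.length_append, List.length_cons, List.length_nil, h2, h1]
  omega

def solution_alt (scoville : List Int) (K : Int) : Int :=
  solutionAltLoop scoville K 0

-- ===== PRECONDITION & SPEC =====
-- A raises IndexError on the empty list (scoville[0]); B raises ValueError there (min([])).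
def Pre_solution (scoville : List Int) (K : Int) : Prop := scoville ≠ []
instance (scoville : List Int) (K : Int) : Decidable (Pre_solution scoville K) := by
  unfold Pre_solution; infer_instance

def pvWitness_solution : List Int × Int := ([1, 2, 3, 9, 10, 12], 7)

def Spec_solution (scoville : List Int) (K : Int) (out : Int) : Prop := out = solution_alt scoville K
instance (scoville : List Int) (K : Int) (out : Int) : Decidable (Spec_solution scoville K out) := by
  unfold Spec_solution; infer_instance

-- ===== CLAIM (what is proved, stated in full; the proofs are below) =====
def Claim_equal_solution : Prop := ∀ (scoville : List Int) (K : Int), Dom_solution scoville K → Pre_solution scoville K → Spec_solution scoville K (solution scoville K)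

-- ===== LEMMAS AND PROOFS =====

theorem minI_isMin (xs : List Int) (h : xs ≠ []) : ∀ y ∈ xs, minI xs ≤ y := by
  match xs with
  | x :: t => exact fun y hy => PySem.List.min?_isMin (minI_min? x t) y hy

theorem heapPush_perm (x : Int) (l : List Int) : (heapPush x l).Perm (x :: l) := by
  induction l with
  | nil => simp [heapPush]
  | cons y ys ih =>
    simp only [heapPush]
    split
    · exact List.Perm.refl _
    · exact (ih.cons y).trans (List.Perm.swap x y ys)

theorem heapPush_sorted (x : Int) (l : List Int) (hs : l.Pairwise (· ≤ ·)) :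
    (heapPush x l).Pairwise (· ≤ ·) := by
  induction l with
  | nil => exact List.pairwise_singleton _ _
  | cons y ys ih =>
    simp only [heapPush]
    split
    · rename_i hxy
      refine List.pairwise_cons.2 ⟨?_, hs⟩
      intro b hb
      rcases List.mem_cons.1 hb with rfl | hb'
      · exact hxy
      · exact le_trans hxy ((List.pairwise_cons.1 hs).1 b hb')
    · rename_i hxy
      have hys := (List.pairwise_cons.1 hs).2
      refine List.pairwise_cons.2 ⟨?_, ih hys⟩
      intro b hb
      rcases List.mem_cons.1 ((heapPush_perm x ys).mem_iff.1 hb) with rfl | hb'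
      · omega
      · exact (List.pairwise_cons.1 hs).1 b hb'

theorem heapify_perm (xs : List Int) : (heapify xs).Perm xs := by
  induction xs with
  | nil => simp [heapify]
  | cons x t ih =>
    have : heapify (x :: t) = heapPush x (heapify t) := rfl
    rw [this]
    exact (heapPush_perm x (heapify t)).trans (ih.cons x)

theorem heapify_sorted (xs : List Int) : (heapify xs).Pairwise (· ≤ ·) := by
  induction xs with
  | nil => simp [heapify]
  | cons x t ih => exact heapPush_sorted x (heapify t) ih

-- the head of a sorted permutation of lst is exactly Python's min(lst)
theorem minI_of_sorted_perm (x : Int) (rest lst : List Int)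
    (hp : (x :: rest).Perm lst) (hs : (x :: rest).Pairwise (· ≤ ·)) :
    minI lst = x := by
  have hne : lst ≠ [] := by
    intro h; subst h; exact (List.cons_ne_nil x rest) hp.eq_nil
  have hmmem : minI lst ∈ lst := minI_mem lst hne
  have hxmem : x ∈ lst := hp.mem_iff.1 List.mem_cons_self
  have h1 : minI lst ≤ x := minI_isMin lst hne x hxmem
  have h2 : x ≤ minI lst := by
    rcases List.mem_cons.1 (hp.mem_iff.2 hmmem) with heq | hm'
    · omega
    · exact (List.pairwise_cons.1 hs).1 _ hm'
  omega

-- the simulation invariant: a sorted heap h that is a permutation of B's working list lst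
-- makes the two loops agree, for any accumulator
theorem loop_eq (K : Int) : ∀ n (h lst : List Int) (c : Int),
    lst.length = n → h.Perm lst → h.Pairwise (· ≤ ·) → lst ≠ [] →
    solutionLoop h K c = solutionAltLoop lst K c := by
  intro n
  induction n with
  | zero =>
    intro h lst c hlen _ _ hne
    exact absurd (List.length_eq_zero_iff.1 hlen) hne
  | succ n ih =>
    intro h lst c hlen hp hs hne
    match h with
    | [] => exact absurd hp.symm.eq_nil hne
    | x :: rest =>
      have hmin : minI lst = x := minI_of_sorted_perm x rest lst hp hs
      rw [solutionLoop.eq_def, solutionAltLoop.eq_def]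
      simp only [dif_neg hne, hmin]
      by_cases hxK : x < K
      · simp only [if_pos hxK]
        have hlenlst : lst.length = rest.length + 1 := by
          rw [← hp.length_eq]; rfl
        match rest with
        | [] =>
          have h2 : lst.length < 2 := by
            simp only [List.length_nil] at hlenlst; omega
          simp [h2]
        | y :: rest2 =>
          have hlen2 : ¬ (lst.length < 2) := by
            simp only [hlenlst, List.length_cons]; omega
          simp only [if_neg hlen2]
          -- B's first erase: lst.erase x is a permutation of rest = y :: rest2
          have hp1 : (y :: rest2).Perm (lst.erase x) := by
            simpa using hp.erase x
          have hs1 : (y :: rest2).Pairwise (· ≤ ·) := (List.pairwise_cons.1 hs).2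
          have hmin2 : minI (lst.erase x) = y :=
            minI_of_sorted_perm y rest2 (lst.erase x) hp1 hs1
          simp only [hmin2]
          -- B's second erase: (lst.erase x).erase y is a permutation of rest2
          have hp2 : ((lst.erase x).erase y).Perm rest2 := by
            have := (hp1.symm).erase y
            simpa using this
          -- apply the induction hypothesis to the new states
          apply ih (heapPush (x + y * 2) rest2)
              (((lst.erase x).erase y) ++ [x + 2 * y]) (c + 1)
          · have hyx : y ∈ lst.erase x := hp1.mem_iff.1 List.mem_cons_self
            have hxl : x ∈ lst := hp.mem_iff.1 List.mem_cons_self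
            have e1 : (lst.erase x).length = lst.length - 1 :=
              List.length_erase_of_mem hxl
            have e2 : ((lst.erase x).erase y).length = (lst.erase x).length - 1 :=
              List.length_erase_of_mem hyx
            simp only [List.length_append, List.length_cons, List.length_nil, e2, e1]
            omega
          · -- heapPush (x+y*2) rest2 ~ (x+y*2)::rest2 ~ rest2++[x+y*2] ~ erase²++[x+2*y]
            have h1 := heapPush_perm (x + y * 2) rest2
            have h2 : ((x + y * 2) :: rest2).Perm (rest2 ++ [x + y * 2]) := by
              simpa using (List.perm_append_comm (l₁ := [x + y * 2]) (l₂ := rest2))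
            have h3 : (rest2 ++ [x + y * 2]).Perm (((lst.erase x).erase y) ++ [x + 2 * y]) := by
              have hval : x + y * 2 = x + 2 * y := by ring
              rw [hval]
              exact hp2.symm.append_right _
            exact (h1.trans h2).trans h3
          · exact heapPush_sorted _ _ ((List.pairwise_cons.1 hs1).2)
          · simp
      · simp [hxK]

-- ===== VERDICT (by name: the statement is the Claim_ definition above) =====
theorem solution_spec : Claim_equal_solution := by
  intro scoville K _ hpre
  unfold Spec_solution solution solution_alt
  exact loop_eq K scoville.length (heapify scoville) scoville 0 rfl
    (heapify_perm scoville) (heapify_sorted scoville) hpre
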